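-- pv_equiv track=rewrite | github.com/Julien-Verdun/TIC-TAC-TOE | utils/functions.py | index_to_grid
-- ===== SOURCE A (Python) =====
-- def index_to_grid(i):
--     """
--     Convert an index i into a list that give the element of this number
--     converted in base 3.
--     """
--     grid = [0 for k in range(9)]
--     j = 0
--     nb = i
--     while nb >= 0 and j <= 8:
--         if nb // (3 ** (8 - j)) > 0:
--             grid[8 - j] = nb // (3 ** (8 - j))
--             nb -= (3 ** (8 - j)) * (nb // (3 ** (8 - j)))
--         j += 1
--     for i in range(len(grid)):
--         grid[i] -= 1
--     return grid
-- ===== SOURCE B (Python) =====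
-- def index_to_grid(i):
--     """
--     Convert an index i into a list that give the element of this number
--     converted in base 3.
--     """
--     if i < 0:
--         return [-1] * 9
--     grid = []
--     nb = i
--     for k in range(8):
--         grid.append(nb % 3 - 1)
--         nb //= 3
--     grid.append(nb - 1)
--     return grid
-- ===== Notes on version B (the rewrite author's own statement) =====
-- stated objective: simpler
-- what changed: Replaces the MSB-first while loop that divides by recomputed powers 3**(8-j) and writes into a preallocated grid (then a second pass subtracting 1) with a single LSB-first repeated divmod-by-3 loop that appends each digit minus 1 directly, with an explicit early return of [-1]*9 for negative i.
import Mathlib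
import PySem

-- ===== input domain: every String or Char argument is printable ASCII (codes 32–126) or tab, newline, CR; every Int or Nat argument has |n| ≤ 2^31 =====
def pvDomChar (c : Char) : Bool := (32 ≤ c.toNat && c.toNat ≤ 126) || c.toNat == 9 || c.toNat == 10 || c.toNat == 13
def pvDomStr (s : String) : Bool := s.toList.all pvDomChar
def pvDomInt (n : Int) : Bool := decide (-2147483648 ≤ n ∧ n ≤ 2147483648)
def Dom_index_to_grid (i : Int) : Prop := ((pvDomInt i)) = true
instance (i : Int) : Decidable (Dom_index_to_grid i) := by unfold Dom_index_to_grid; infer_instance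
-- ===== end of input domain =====

-- B replaces A's MSB-first while loop dividing by recomputed powers 3**(8-j) (plus a second
-- subtract-1 pass) by a single LSB-first repeated-divmod-by-3 loop appending digit-1 directly
-- (objective: simpler).

-- ===== PORT A =====
-- the 'while nb >= 0 and j <= 8' loop; state = (grid, j, nb)
def igLoop (grid : List Int) (j : Nat) (nb : Int) : List Int :=
  if 0 ≤ nb ∧ j ≤ 8 then
    if 0 < PySem.Int.floordiv nb (3 ^ (8 - j)) then
      igLoop (grid.set (8 - j) (PySem.Int.floordiv nb (3 ^ (8 - j)))) (j + 1)
        (nb - 3 ^ (8 - j) * PySem.Int.floordiv nb (3 ^ (8 - j)))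
    else igLoop grid (j + 1) nb
  else grid
termination_by 9 - j
decreasing_by all_goals omega

def index_to_grid (i : Int) : List Int :=
  (igLoop (List.replicate 9 0) 0 i).map (fun g => g - 1)

-- ===== PORT B =====
-- the 'for k in range(8)' loop of Source B, followed by the final append of nb - 1
def igAltLoop (k : Nat) (nb : Int) (grid : List Int) : List Int :=
  if k < 8 then
    igAltLoop (k + 1) (PySem.Int.floordiv nb 3) (grid ++ [PySem.Int.mod nb 3 - 1])
  else grid ++ [nb - 1]
termination_by 8 - k

def index_to_grid_alt (i : Int) : List Int :=
  if i < 0 then List.replicate 9 (-1) else igAltLoop 0 i []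

-- ===== PRECONDITION & SPEC =====
def Spec_index_to_grid (i : Int) (out : List Int) : Prop := out = index_to_grid_alt i
instance (i : Int) (out : List Int) : Decidable (Spec_index_to_grid i out) := by unfold Spec_index_to_grid; infer_instance

-- ===== CLAIM (what is proved, stated in full; the proofs are below) =====
def Claim_equal_index_to_grid : Prop := ∀ (i : Int), Dom_index_to_grid i → Spec_index_to_grid i (index_to_grid i)

-- ===== LEMMAS AND PROOFS =====

lemma set_zero_self (grid : List Int) (p : Nat) (h : grid[p]? = some 0) : grid.set p 0 = grid := by
  obtain ⟨hlt, -⟩ := List.getElem?_eq_some_iff.mp h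
  apply List.ext_getElem?
  intro n
  rw [List.getElem?_set]
  split_ifs <;> simp_all

-- one iteration of A's loop for 0 ≤ nb: writing the quotient and keeping the remainder
-- (when the quotient is 0 the Python branch is skipped, which coincides with setting slot
-- 8-j to 0, since that slot still holds 0)
lemma igLoop_step (grid : List Int) (j : Nat) (nb : Int) (hj : j ≤ 8) (hnb : 0 ≤ nb)
    (h0 : grid[8 - j]? = some 0) :
    igLoop grid j nb = igLoop (grid.set (8 - j) (nb / 3 ^ (8 - j))) (j + 1) (nb % 3 ^ (8 - j)) := by
  have hp : (0 : Int) < 3 ^ (8 - j) := by positivity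
  rw [igLoop, if_pos ⟨hnb, hj⟩, PySem.Int.floordiv_eq_ediv_of_pos hp]
  by_cases hd : 0 < nb / 3 ^ (8 - j)
  · rw [if_pos hd]
    congr 1
    rw [Int.emod_def]
  · rw [if_neg hd]
    have hz : nb / 3 ^ (8 - j) = 0 :=
      le_antisymm (not_lt.mp hd) (Int.ediv_nonneg hnb (le_of_lt hp))
    rw [hz, set_zero_self _ _ h0, Int.emod_def, hz]
    norm_num

lemma igLoop_stop (grid : List Int) (nb : Int) : igLoop grid 9 nb = grid := by
  rw [igLoop]; norm_num

lemma eq_of_nonneg (i : Int) (h : 0 ≤ i) : index_to_grid i = index_to_grid_alt i := by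
  rw [index_to_grid, index_to_grid_alt, if_neg (not_lt.mpr h)]
  rw [igLoop_step _ 0 _ (by norm_num) h (by decide),
      igLoop_step _ 1 _ (by norm_num) (by omega) (by norm_num [List.getElem?_set]),
      igLoop_step _ 2 _ (by norm_num) (by omega) (by norm_num [List.getElem?_set]),
      igLoop_step _ 3 _ (by norm_num) (by omega) (by norm_num [List.getElem?_set]),
      igLoop_step _ 4 _ (by norm_num) (by omega) (by norm_num [List.getElem?_set]),
      igLoop_step _ 5 _ (by norm_num) (by omega) (by norm_num [List.getElem?_set]),
      igLoop_step _ 6 _ (by norm_num) (by omega) (by norm_num [List.getElem?_set]),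
      igLoop_step _ 7 _ (by norm_num) (by omega) (by norm_num [List.getElem?_set]),
      igLoop_step _ 8 _ (by norm_num) (by omega) (by norm_num [List.getElem?_set]),
      igLoop_stop]
  rw [igAltLoop]; rw [igAltLoop]; rw [igAltLoop]; rw [igAltLoop]; rw [igAltLoop]
  rw [igAltLoop]; rw [igAltLoop]; rw [igAltLoop]; rw [igAltLoop]
  simp only [PySem.Int.floordiv_eq_ediv_of_pos (show (0:Int) < 3 by norm_num),
    PySem.Int.mod_eq_emod_of_pos (show (0:Int) < 3 by norm_num)]
  norm_num [List.replicate, List.set, List.map]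
  and_intros <;> omega

lemma eq_of_neg (i : Int) (h : i < 0) : index_to_grid i = index_to_grid_alt i := by
  simp only [index_to_grid, index_to_grid_alt, if_pos h]
  rw [igLoop]
  simp [not_le.mpr h]

-- ===== VERDICT (by name: the statement is the Claim_ definition above) =====
theorem index_to_grid_spec : Claim_equal_index_to_grid := by
  intro i _
  unfold Spec_index_to_grid
  by_cases h : i < 0
  · exact eq_of_neg i h
  · exact eq_of_nonneg i (not_lt.mp h)
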